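-- pv_equiv track=rewrite | github.com/da-h/miniflask | src/miniflask/modules/settings/__init__.py | sorted_by_state_key_modules
-- ===== SOURCE A (Python) =====
-- import copy
-- from collections import deque
--
-- def sorted_by_state_key_modules(items):
--     """Sort items based on state keys with module nesting, and alphabetical order."""
--     module_tree_template = {"modules": {}, "params": []}
--     module_tree = copy.deepcopy(module_tree_template)
--     for k, v in items:
--         leaf = module_tree
--         for mod in k.split('.')[:-1]:
--             _leaf = leaf["modules"].get(mod, copy.deepcopy(module_tree_template))
--             if mod not in leaf:
--                 leaf["modules"][mod] = _leaf
--             leaf = _leaf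
--         leaf["params"].append((k, v))
--     # iterate over tree
--     modules = deque([module_tree])
--     while modules:
--         mod = modules.pop()
--         for m in sorted(mod["modules"], reverse=True, key=str.lower):
--             modules.append(mod["modules"][m])
--         for e in sorted(mod["params"], key=lambda tup: str.lower(tup[0])):
--             yield e
-- ===== SOURCE B (Python) =====
-- def sorted_by_state_key_modules(items):
--     """Hierarchical case-insensitive sort of (key, value) items by module path.
--
--     Re-implementation by recursive partitioning of the split key paths (no
--     nested mutable tree, no explicit stack).  The descending sort followed by a
--     reversal is an ascending order that keeps case-colliding sibling module
--     names in the same (reverse first-occurrence) order as the original's stack.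
--     Unlike the original, items whose key has an intermediate path component
--     literally named 'modules' or 'params' are kept (the original loses them to
--     a membership test against the wrong dict).
--     """
--     def rec(entries):
--         params = [kv for path, kv in entries if not path]
--         children = [(path[0], (path[1:], kv)) for path, kv in entries if path]
--         groups = {}
--         for name, sub in children:
--             groups.setdefault(name, []).append(sub)
--         for kv in sorted(params, key=lambda kv: kv[0].lower()):
--             yield kv
--         for name in reversed(sorted(groups, key=str.lower, reverse=True)):
--             yield from rec(groups[name])
--     yield from rec([(k.split('.')[:-1], (k, v)) for k, v in items])
-- ===== Notes on version B (the rewrite author's own statement) =====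
-- stated objective: alternative
-- what changed: Replaces the mutable nested dict-tree plus explicit deque/stack DFS by a recursive partitioning of the pre-split key paths (group entries by first path component, recurse on the tails); no tree object and no stack are built.
-- intended difference: On items whose key contains an intermediate path component literally named 'modules' or 'params', A's membership test checks the wrong dict and silently drops those items from the output, while B keeps them in their proper hierarchical position, which is what a sort function is meant to do. — e.g. on sorted_by_state_key_modules([("modules.x", "1")]): A returns [], B returns [("modules.x", "1")]
import Mathlib
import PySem

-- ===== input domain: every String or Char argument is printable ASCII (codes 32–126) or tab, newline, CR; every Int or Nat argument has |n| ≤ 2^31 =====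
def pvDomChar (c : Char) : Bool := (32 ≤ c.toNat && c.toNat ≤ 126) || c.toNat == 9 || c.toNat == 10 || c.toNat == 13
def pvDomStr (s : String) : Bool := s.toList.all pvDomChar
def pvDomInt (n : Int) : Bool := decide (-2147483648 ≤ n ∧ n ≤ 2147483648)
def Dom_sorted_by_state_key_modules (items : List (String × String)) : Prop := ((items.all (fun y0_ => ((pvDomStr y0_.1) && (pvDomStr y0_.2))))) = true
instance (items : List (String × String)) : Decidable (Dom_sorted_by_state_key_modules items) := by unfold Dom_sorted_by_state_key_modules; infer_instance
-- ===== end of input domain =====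

-- B replaces the mutable nested dict-tree + explicit stack DFS of A by a recursive
-- partitioning of the split key paths; B also keeps items whose key has an intermediate
-- path component literally named "modules"/"params", which A silently drops (see D_).
-- Both Pythons are generators; equivalence is about the yielded sequence.

-- ===== PORT A =====
-- the nested dicts {"modules": {...}, "params": [...]}: a tree is a pair
-- (forest of named subtrees, params list); the forest keeps dict insertion order.
-- (child forest and child params are inlined fields to avoid a nested inductive)
inductive PVForest where
  | nil : PVForest
  | cons : String → PVForest → List (String × String) → PVForest → PVForest
deriving DecidableEq, Repr

-- dict lookup: first (only) match
def PVForest.get? : PVForest → String → Option (PVForest × List (String × String))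
  | .nil, _ => none
  | .cons n cf cp r, c => if n = c then some (cf, cp) else r.get? c

-- dict store: overwrite keeps position, new key appends
def PVForest.set : PVForest → String → (PVForest × List (String × String)) → PVForest
  | .nil, c, t => .cons c t.1 t.2 .nil
  | .cons n cf cp r, c, t => if n = c then .cons n t.1 t.2 r else .cons n cf cp (r.set c t)

-- iterating the dict together with its lookups = iterating its items (keys are unique)
def PVForest.items : PVForest → List (String × PVForest × List (String × String))
  | .nil => []
  | .cons n cf cp r => (n, cf, cp) :: r.items

def PVForest.size : PVForest → Nat
  | .nil => 0
  | .cons _ cf _ r => 1 + cf.size + r.size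

-- k.split('.')[:-1]  (separator "." is nonempty, so split? is always `some`)
def pvPathOf (k : String) : List String :=
  ((PySem.Str.split? k ".").getD []).dropLast

-- the inner `for mod in k.split('.')[:-1]` walk; Python's membership test
-- `mod not in leaf` checks the dict with keys "modules"/"params", so when it fails
-- Python mutates an unreachable fresh template: the tree is unchanged.
def pvInsertWalk : PVForest × List (String × String) → List String → (String × String) → PVForest × List (String × String)
  | (f, p), [], kv => (f, p ++ [kv])
  | (f, p), c :: rest, kv =>
    if c ≠ "modules" ∧ c ≠ "params" then
      (f.set c (pvInsertWalk ((f.get? c).getD (.nil, [])) rest kv), p)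
    else
      (f, p)

-- the `while modules:` deque loop: pop from the right, push the children
-- (sorted descending by lowercase name), yield the params sorted by lowercase key.
-- The Nat fuel only makes the loop total; the port passes enough fuel for every iteration.
def pvStackLoopF : Nat → List (PVForest × List (String × String)) → List (String × String)
  | 0, _ => []
  | _, [] => []
  | fuel + 1, (f, p) :: rest =>
    PySem.List.sorted p (fun kv => PySem.Str.lower kv.1) false ++
      pvStackLoopF fuel ((PySem.List.sorted f.items (fun e => PySem.Str.lower e.1) true).foldl
        (fun st e => e.2 :: st) rest)

-- the first half of A: build the module tree from the items
def pvBuildA (items : List (String × String)) : PVForest × List (String × String) :=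
  items.foldl (fun t kv => pvInsertWalk t (pvPathOf kv.1) kv) (.nil, [])

def sorted_by_state_key_modules (items : List (String × String)) : List (String × String) :=
  pvStackLoopF ((pvBuildA items).1.size + 1) [pvBuildA items]

-- ===== PORT B =====
-- B's entry type: (remaining module path, (key, value))
-- children = [(path[0], (path[1:], kv)) for path, kv in entries if path]
def pvChildren (es : List (List String × String × String)) : List (String × List String × String × String) :=
  es.filterMap (fun e => match e.1 with
    | [] => none
    | c :: rest => some (c, rest, e.2))

-- groups: {}; for name, sub in children: groups.setdefault(name, []).append(sub)
def pvGroups (es : List (List String × String × String)) :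
    PySem.Dict String (List (List String × String × String)) :=
  (pvChildren es).foldl (fun d p => d.modify p.1 [] (fun g => g ++ [p.2])) PySem.Dict.empty

-- termination bookkeeping for the recursion
def pvMeasure (es : List (List String × String × String)) : Nat :=
  (es.map (fun e => e.1.length + 1)).sum

-- rec(entries): yield the depth-0 params sorted by lowercase key, then recurse into the
-- groups; the descending sort followed by a reversal is ascending by lowercase name with
-- case-colliding sibling names kept in the same (reverse first-occurrence) order as A's stack.
-- The Nat fuel only makes the recursion total; the port passes enough fuel for every level.
def pvRecBF : Nat → List (List String × String × String) → List (String × String)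
  | 0, _ => []
  | fuel + 1, es =>
    PySem.List.sorted ((es.filter (fun e => e.1.isEmpty)).map (fun e => e.2))
        (fun kv => PySem.Str.lower kv.1) false ++
      (PySem.List.sorted (pvGroups es).keys PySem.Str.lower true).reverse.flatMap
        (fun c => pvRecBF fuel ((pvGroups es).getD c []))

-- entries = [(k.split('.')[:-1], (k, v)) for k, v in items]
def pvEntries (items : List (String × String)) : List (List String × String × String) :=
  items.map (fun kv => (pvPathOf kv.1, kv))

def sorted_by_state_key_modules_alt (items : List (String × String)) : List (String × String) :=
  pvRecBF (pvMeasure (pvEntries items) + 1) (pvEntries items)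

-- ===== PRECONDITION & SPEC =====
-- On items whose key has an intermediate path component literally named "modules" or
-- "params", A's membership test `mod not in leaf` checks the wrong dict, so A appends
-- those items to an unreachable fresh subtree and silently drops them from its output,
-- while B yields them in their proper hierarchical position, which is what a sort is for.
def D_sorted_by_state_key_modules (items : List (String × String)) : Prop :=
  ∃ kv ∈ items, ∃ c ∈ ((PySem.Str.split? kv.1 ".").getD []).dropLast, c = "modules" ∨ c = "params"
instance (items : List (String × String)) : Decidable (D_sorted_by_state_key_modules items) := by
  unfold D_sorted_by_state_key_modules; infer_instance

def Spec_sorted_by_state_key_modules (items : List (String × String)) (out : List (String × String)) : Prop :=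
  ¬ D_sorted_by_state_key_modules items → out = sorted_by_state_key_modules_alt items
instance (items : List (String × String)) (out : List (String × String)) : Decidable (Spec_sorted_by_state_key_modules items out) := by
  unfold Spec_sorted_by_state_key_modules; infer_instance

def pvDiffWitness_sorted_by_state_key_modules : List (String × String) := [("modules.x", "1")]
def pvDiffWitnessOut_sorted_by_state_key_modules : (List (String × String)) × (List (String × String)) :=
  ([], [("modules.x", "1")])

-- ===== CLAIM (what is proved, stated in full; the proofs are below) =====
def Claim_unchanged_sorted_by_state_key_modules : Prop := ∀ (items : List (String × String)), Dom_sorted_by_state_key_modules items → Spec_sorted_by_state_key_modules items (sorted_by_state_key_modules items)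
def Claim_changed_sorted_by_state_key_modules : Prop := Dom_sorted_by_state_key_modules (pvDiffWitness_sorted_by_state_key_modules) ∧ D_sorted_by_state_key_modules (pvDiffWitness_sorted_by_state_key_modules) ∧ sorted_by_state_key_modules (pvDiffWitness_sorted_by_state_key_modules) = pvDiffWitnessOut_sorted_by_state_key_modules.1 ∧ sorted_by_state_key_modules_alt (pvDiffWitness_sorted_by_state_key_modules) = pvDiffWitnessOut_sorted_by_state_key_modules.2 ∧ pvDiffWitnessOut_sorted_by_state_key_modules.1 ≠ pvDiffWitnessOut_sorted_by_state_key_modules.2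

def Claim_exact_sorted_by_state_key_modules : Prop := ∀ (items : List (String × String)), Dom_sorted_by_state_key_modules items → D_sorted_by_state_key_modules items → sorted_by_state_key_modules items ≠ sorted_by_state_key_modules_alt items

-- ===== LEMMAS AND PROOFS =====

-- termination bookkeeping for the stack loop
theorem pvPushSum (l : List (String × PVForest × List (String × String)))
    (st : List (PVForest × List (String × String))) :
    ((l.foldl (fun st e => e.2 :: st) st).map (fun t => t.1.size + 1)).sum
      = (l.map (fun e => e.2.1.size + 1)).sum + (st.map (fun t => t.1.size + 1)).sum := by
  induction l generalizing st with
  | nil => simp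
  | cons e l ih =>
    rw [List.foldl_cons, ih]
    simp only [List.map_cons, List.sum_cons]
    omega

theorem pvItemsSizeSum (F : PVForest) :
    (F.items.map (fun e => e.2.1.size + 1)).sum = F.size := by
  induction F with
  | nil => rfl
  | cons n cf cp r ih =>
    simp only [PVForest.items, List.map_cons, List.sum_cons, PVForest.size]
    omega

theorem pvSortedSizeSum (l : List (String × PVForest × List (String × String))) :
    ((PySem.List.sorted l (fun e => PySem.Str.lower e.1) true).map (fun e => e.2.1.size + 1)).sum
      = (l.map (fun e => e.2.1.size + 1)).sum :=
  ((PySem.List.sorted_perm l (fun e => PySem.Str.lower e.1) true).map _).sum_eq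

-- the `while modules:` deque loop: pop from the right, push the children
-- (sorted descending by lowercase name), yield the params sorted by lowercase key
def pvStackLoop : List (PVForest × List (String × String)) → List (String × String)
  | [] => []
  | (f, p) :: rest =>
    PySem.List.sorted p (fun kv => PySem.Str.lower kv.1) false ++
      pvStackLoop ((PySem.List.sorted f.items (fun e => PySem.Str.lower e.1) true).foldl
        (fun st e => e.2 :: st) rest)
  termination_by ts => (ts.map (fun t => t.1.size + 1)).sum
  decreasing_by
    rw [pvPushSum, pvSortedSizeSum, pvItemsSizeSum]
    simp only [List.map_cons, List.sum_cons]
    omega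

def pvSub (c : String) (es : List (List String × String × String)) : List (List String × String × String) :=
  ((pvChildren es).filter (fun p => p.1 == c)).map (fun p => p.2)

theorem pvGroups_getD (es : List (List String × String × String)) (c : String) :
    (pvGroups es).getD c [] = pvSub c es := by
  unfold pvGroups pvSub
  rw [PySem.Dict.getD_foldl_modify_append]
  simp

theorem pvGroups_keys (es : List (List String × String × String)) :
    (pvGroups es).keys = PySem.Set.ofList ((pvChildren es).map (fun p => p.1)) := by
  unfold pvGroups
  rw [PySem.Dict.keys_foldl_modify_key (pvChildren es) (fun p => p.1) [] (fun _ p => fun g => g ++ [p.2])]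
  simp only [PySem.Dict.empty, PySem.Dict.keys]
  exact PySem.Set.update_empty _

theorem pvMeasure_sub_le (c : String) : ∀ es, pvMeasure (pvSub c es) ≤ pvMeasure es := by
  intro es
  induction es with
  | nil => simp [pvMeasure, pvSub, pvChildren]
  | cons e es ih =>
    obtain ⟨path, kv⟩ := e
    cases path with
    | nil => simp only [pvSub, pvChildren, List.filterMap_cons] at *; simp [pvMeasure] at *; omega
    | cons a rest =>
      simp only [pvSub, pvChildren, List.filterMap_cons] at *
      by_cases h : a = c
      · simp [pvMeasure, h] at *; omega
      · simp [pvMeasure, h] at *; omega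

theorem pvMeasure_sub_lt (c : String) : ∀ es, c ∈ (pvChildren es).map (fun p => p.1) →
    pvMeasure (pvSub c es) < pvMeasure es := by
  intro es
  induction es with
  | nil => simp [pvChildren]
  | cons e es ih =>
    obtain ⟨path, kv⟩ := e
    cases path with
    | nil =>
      intro hc
      simp only [pvChildren, List.filterMap_cons] at hc
      have := ih hc
      simp only [pvSub, pvChildren, List.filterMap_cons] at *
      simp [pvMeasure] at *; omega
    | cons a rest =>
      intro hc
      by_cases h : a = c
      · have := pvMeasure_sub_le c es
        simp only [pvSub, pvChildren, List.filterMap_cons] at *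
        simp [pvMeasure, h] at *
        omega
      · simp only [pvChildren, List.filterMap_cons, List.map_cons, List.mem_cons] at hc
        rcases hc with hc | hc
        · exact absurd hc (fun hh => h hh.symm)
        · have := ih hc
          simp only [pvSub, pvChildren, List.filterMap_cons] at *
          simp [pvMeasure, h] at *
          omega

-- rec spec as a well-founded recursion (proof-side twin of the fuelled port)
def pvRecB (es : List (List String × String × String)) : List (String × String) :=
  PySem.List.sorted ((es.filter (fun e => e.1.isEmpty)).map (fun e => e.2))
      (fun kv => PySem.Str.lower kv.1) false ++
    (PySem.List.sorted (pvGroups es).keys PySem.Str.lower true).reverse.attach.flatMap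
      (fun c => pvRecB ((pvGroups es).getD c.1 []))
  termination_by pvMeasure es
  decreasing_by
    rcases c with ⟨cv, hcv⟩
    rw [List.mem_reverse, PySem.List.mem_sorted, pvGroups_keys, PySem.Set.mem_ofList] at hcv
    rw [pvGroups_getD]
    exact pvMeasure_sub_lt cv es hcv


theorem pvStackLoopF_eq : ∀ (n : Nat) (ts : List (PVForest × List (String × String))),
    (ts.map (fun t => t.1.size + 1)).sum ≤ n → pvStackLoopF n ts = pvStackLoop ts := by
  intro n
  induction n with
  | zero =>
    intro ts h
    cases ts with
    | nil => simp [pvStackLoopF, pvStackLoop]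
    | cons t ts => simp at h
  | succ n ih =>
    intro ts h
    cases ts with
    | nil => simp [pvStackLoopF, pvStackLoop]
    | cons t ts =>
      obtain ⟨f, p⟩ := t
      rw [pvStackLoopF, pvStackLoop]
      congr 1
      apply ih
      have h1 := pvPushSum (PySem.List.sorted f.items (fun e => PySem.Str.lower e.1) true) ts
      rw [pvSortedSizeSum, pvItemsSizeSum] at h1
      rw [h1]
      simp only [List.map_cons, List.sum_cons] at h
      omega

theorem pvStackLoopF_run (t : PVForest × List (String × String)) :
    pvStackLoopF (t.1.size + 1) [t] = pvStackLoop [t] :=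
  pvStackLoopF_eq (t.1.size + 1) [t] (by simp)


-- entry paths contain no "modules"/"params" component
def pvGood (es : List (List String × String × String)) : Prop :=
  ∀ e ∈ es, ∀ c ∈ e.1, ¬(c = "modules" ∨ c = "params")

def pvBuildE (es : List (List String × String × String)) : PVForest × List (String × String) :=
  es.foldl (fun t e => pvInsertWalk t e.1 e.2) (.nil, [])

-- B's recursion with the subtype `attach` removed and the groups spelled as filters
theorem pvRecB_eq (es : List (List String × String × String)) :
    pvRecB es
      = PySem.List.sorted ((es.filter (fun e => e.1.isEmpty)).map (fun e => e.2))
          (fun kv => PySem.Str.lower kv.1) false ++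
        (PySem.List.sorted (PySem.Set.ofList ((pvChildren es).map (fun p => p.1)))
            PySem.Str.lower true).reverse.flatMap
          (fun c => pvRecB (pvSub c es)) := by
  rw [pvRecB]
  simp [List.flatMap_def, pvGroups_getD, pvGroups_keys]

theorem pvRecBF_eq : ∀ (n : Nat) (es : List (List String × String × String)),
    pvMeasure es < n → pvRecBF n es = pvRecB es := by
  intro n
  induction n with
  | zero => intro es h; omega
  | succ n ih =>
    intro es h
    rw [pvRecBF, pvRecB_eq, pvGroups_keys]
    congr 1
    refine List.flatMap_congr ?_
    intro c hc
    rw [List.mem_reverse, PySem.List.mem_sorted, PySem.Set.mem_ofList] at hc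
    rw [pvGroups_getD]
    have hlt := pvMeasure_sub_lt c es hc
    exact ih (pvSub c es) (by omega)

theorem pvRecBF_run (es : List (List String × String × String)) :
    pvRecBF (pvMeasure es + 1) es = pvRecB es :=
  pvRecBF_eq (pvMeasure es + 1) es (Nat.lt_succ_self _)

-- params of the built tree are the depth-0 entries, in order
theorem pvBuildE_params_aux : ∀ (es : List (List String × String × String))
    (t : PVForest × List (String × String)),
    ((es.foldl (fun t e => pvInsertWalk t e.1 e.2) t)).2
      = t.2 ++ (es.filter (fun e => e.1.isEmpty)).map (fun e => e.2) := by
  intro es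
  induction es with
  | nil => intro t; simp
  | cons e es ih =>
    intro t
    obtain ⟨f, p⟩ := t
    obtain ⟨path, kv⟩ := e
    cases path with
    | nil =>
      rw [List.foldl_cons, ih]
      simp [pvInsertWalk]
    | cons c rest =>
      rw [List.foldl_cons, ih]
      simp only [pvInsertWalk]
      split_ifs <;> simp

theorem pvBuildE_params (es : List (List String × String × String)) :
    (pvBuildE es).2 = (es.filter (fun e => e.1.isEmpty)).map (fun e => e.2) := by
  simpa using pvBuildE_params_aux es (.nil, [])

-- association-list picture of PVForest.set
def pvSetAssoc : List (String × PVForest × List (String × String)) → String →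
    (PVForest × List (String × String)) → List (String × PVForest × List (String × String))
  | [], c, t => [(c, t)]
  | (n, v) :: r, c, t => if n = c then (n, t) :: r else (n, v) :: pvSetAssoc r c t

theorem pvItems_set : ∀ (F : PVForest) (c : String) (t : PVForest × List (String × String)),
    (F.set c t).items = pvSetAssoc F.items c t := by
  intro F
  induction F with
  | nil => intro c t; rfl
  | cons n cf cp r ih1 ih2 =>
    intro c t
    simp only [PVForest.set, PVForest.items, pvSetAssoc]
    split <;> simp [PVForest.items, ih2]

theorem pvGet?_eq_find : ∀ (F : PVForest) (c : String),
    F.get? c = (F.items.find? (fun p => p.1 == c)).map (fun p => p.2) := by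
  intro F
  induction F with
  | nil => intro c; rfl
  | cons n cf cp r ih1 ih2 =>
    intro c
    simp only [PVForest.get?, PVForest.items, List.find?_cons]
    by_cases h : n = c
    · simp [h]
    · have hb : (n == c) = false := beq_eq_false_iff_ne.mpr h
      simp only [hb]
      rw [if_neg h]
      exact ih2 c

theorem pvFind?_map_of_mem (keys : List String)
    (h : String → PVForest × List (String × String)) (c : String) (hc : c ∈ keys) :
    ((keys.map (fun k => (k, h k))).find? (fun p => p.1 == c)) = some (c, h c) := by
  induction keys with
  | nil => simp at hc
  | cons k ks ih =>
    by_cases hk : k = c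
    · subst hk; simp
    · simp only [List.mem_cons] at hc
      rcases hc with hc | hc
      · exact absurd hc.symm hk
      · simp [hk, ih hc]

theorem pvFind?_map_of_not_mem (keys : List String)
    (h : String → PVForest × List (String × String)) (c : String) (hc : c ∉ keys) :
    ((keys.map (fun k => (k, h k))).find? (fun p => p.1 == c)) = none := by
  induction keys with
  | nil => rfl
  | cons k ks ih =>
    simp only [List.mem_cons, not_or] at hc
    have hkc : k ≠ c := fun h => hc.1 h.symm
    simp [hkc, ih hc.2]

theorem pvSetAssoc_map_of_mem (keys : List String)
    (h : String → PVForest × List (String × String)) (c : String)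
    (t : PVForest × List (String × String)) (hnd : keys.Nodup) (hc : c ∈ keys) :
    pvSetAssoc (keys.map (fun k => (k, h k))) c t
      = keys.map (fun k => if k = c then (c, t) else (k, h k)) := by
  induction keys with
  | nil => simp at hc
  | cons k ks ih =>
    simp only [List.nodup_cons] at hnd
    by_cases hk : k = c
    · subst hk
      have hstep : pvSetAssoc ((k, h k) :: ks.map (fun j => (j, h j))) k t
          = (k, t) :: ks.map (fun j => (j, h j)) := by
        simp [pvSetAssoc]
      rw [List.map_cons, hstep, List.map_cons, if_pos rfl]
      congr 1
      refine (List.map_congr_left ?_).symm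
      intro j hj
      have hjk : j ≠ k := fun hjk => hnd.1 (hjk ▸ hj)
      simp [hjk]
    · simp only [List.mem_cons] at hc
      rcases hc with hc | hc
      · exact absurd hc.symm hk
      · simp only [List.map_cons, pvSetAssoc, if_neg hk, ih hnd.2 hc]

theorem pvSetAssoc_of_not_mem : ∀ (l : List (String × PVForest × List (String × String)))
    (c : String) (t : PVForest × List (String × String)), c ∉ l.map (fun p => p.1) →
    pvSetAssoc l c t = l ++ [(c, t)] := by
  intro l
  induction l with
  | nil => intro c t _; rfl
  | cons p l ih =>
    intro c t hc
    simp only [List.map_cons, List.mem_cons, not_or] at hc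
    obtain ⟨n, v⟩ := p
    simp only [pvSetAssoc, if_neg (show ¬ n = c from fun h => hc.1 h.symm)]
    simp [ih c t hc.2]

theorem pvChildren_append (es fs : List (List String × String × String)) :
    pvChildren (es ++ fs) = pvChildren es ++ pvChildren fs := by
  simp [pvChildren]

theorem pvSub_append (c : String) (es fs : List (List String × String × String)) :
    pvSub c (es ++ fs) = pvSub c es ++ pvSub c fs := by
  simp [pvSub, pvChildren_append]

theorem pvSub_nil_of_not_mem (c : String) (es : List (List String × String × String))
    (hc : c ∉ (pvChildren es).map (fun p => p.1)) : pvSub c es = [] := by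
  unfold pvSub
  rw [List.filter_eq_nil_iff.mpr, List.map_nil]
  intro p hp
  simp only [beq_iff_eq]
  intro hpc
  exact hc (List.mem_map.mpr ⟨p, hp, hpc⟩)

theorem pvBuildE_append (es fs : List (List String × String × String)) :
    pvBuildE (es ++ fs) = fs.foldl (fun t e => pvInsertWalk t e.1 e.2) (pvBuildE es) := by
  simp [pvBuildE, List.foldl_append]

-- forest of the built tree = the grouping of the entries (Good entries)
theorem pvBuildE_items : ∀ (es : List (List String × String × String)), pvGood es →
    (pvBuildE es).1.items
      = (PySem.Set.ofList ((pvChildren es).map (fun p => p.1))).map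
          (fun c => (c, pvBuildE (pvSub c es))) := by
  intro es
  induction es using List.reverseRecOn with
  | nil => intro _; rfl
  | append_singleton es e ih =>
    intro hg
    have hge : pvGood es := fun x hx => hg x (List.mem_append_left _ hx)
    have hIH := ih hge
    obtain ⟨path, kv⟩ := e
    rw [pvBuildE_append]
    cases path with
    | nil =>
      simp only [List.foldl_cons, List.foldl_nil, pvInsertWalk]
      have h1 : pvChildren (es ++ [([], kv)]) = pvChildren es := by
        rw [pvChildren_append]; simp [pvChildren]
      rw [h1]
      rw [hIH]
      refine List.map_congr_left ?_
      intro k _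
      have : pvSub k (es ++ [([], kv)]) = pvSub k es := by
        rw [pvSub_append]; simp [pvSub, pvChildren]
      rw [this]
    | cons c0 rest =>
      have hc0 : ¬(c0 = "modules" ∨ c0 = "params") :=
        hg (c0 :: rest, kv) (List.mem_append_right _ (List.mem_singleton.mpr rfl)) c0
          (List.mem_cons_self)
      have hguard : c0 ≠ "modules" ∧ c0 ≠ "params" :=
        ⟨fun h => hc0 (Or.inl h), fun h => hc0 (Or.inr h)⟩
      have hch : pvChildren (es ++ [(c0 :: rest, kv)]) = pvChildren es ++ [(c0, rest, kv)] := by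
        rw [pvChildren_append]; simp [pvChildren]
      have hsubc0 : pvSub c0 (es ++ [(c0 :: rest, kv)]) = pvSub c0 es ++ [(rest, kv)] := by
        rw [pvSub_append]; simp [pvSub, pvChildren]
      have hsubne : ∀ k, k ≠ c0 → pvSub k (es ++ [(c0 :: rest, kv)]) = pvSub k es := by
        intro k hk
        have hck : c0 ≠ k := fun h => hk h.symm
        rw [pvSub_append]
        simp [pvSub, pvChildren, hck]
      have hwalk : pvInsertWalk (pvBuildE es) (c0 :: rest) kv
          = ((pvBuildE es).1.set c0
              (pvInsertWalk (((pvBuildE es).1.get? c0).getD (.nil, [])) rest kv),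
             (pvBuildE es).2) := by
        obtain ⟨F, P⟩ := pvBuildE es
        simp [pvInsertWalk, hguard]
      simp only [List.foldl_cons, List.foldl_nil]
      rw [hwalk]
      simp only []
      rw [pvItems_set, pvGet?_eq_find, hIH]
      by_cases hmem : c0 ∈ (pvChildren es).map (fun p => p.1)
      · have hmem' : c0 ∈ PySem.Set.ofList ((pvChildren es).map (fun p => p.1)) :=
          (PySem.Set.mem_ofList _ _).mpr hmem
        rw [pvFind?_map_of_mem _ _ _ hmem']
        simp only [Option.map_some, Option.getD_some]
        rw [pvSetAssoc_map_of_mem _ _ _ _ (PySem.Set.nodup_ofList _) hmem']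
        rw [hch]
        simp only [List.map_append, List.map_cons, List.map_nil]
        rw [PySem.Set.ofList_append_singleton, PySem.Set.add_of_mem hmem']
        refine List.map_congr_left ?_
        intro k _
        by_cases hkc : k = c0
        · subst hkc
          rw [if_pos rfl, hsubc0, pvBuildE_append]
          simp
        · simp only [if_neg hkc]
          rw [hsubne k hkc]
      · have hmem' : c0 ∉ PySem.Set.ofList ((pvChildren es).map (fun p => p.1)) := by
          rw [PySem.Set.mem_ofList]; exact hmem
        rw [pvFind?_map_of_not_mem _ _ _ hmem']
        simp only [Option.map_none, Option.getD_none]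
        rw [pvSetAssoc_of_not_mem _ _ _ (by simpa using hmem')]
        rw [hch]
        simp only [List.map_append, List.map_cons, List.map_nil]
        rw [PySem.Set.ofList_append_singleton, PySem.Set.add_of_not_mem hmem', List.map_append]
        congr 1
        · refine List.map_congr_left ?_
          intro k hk
          have hkc : k ≠ c0 := by
            intro h
            exact hmem' (h ▸ hk)
          rw [hsubne k hkc]
        · simp only [List.map_cons, List.map_nil]
          rw [hsubc0, pvSub_nil_of_not_mem c0 es hmem]
          simp [pvBuildE]

theorem pvPushFoldAppend (l : List (String × PVForest × List (String × String))) :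
    ∀ (a b : List (PVForest × List (String × String))),
    l.foldl (fun st e => e.2 :: st) (a ++ b) = (l.foldl (fun st e => e.2 :: st) a) ++ b := by
  induction l with
  | nil => intro a b; simp
  | cons e l ih =>
    intro a b
    rw [List.foldl_cons, List.foldl_cons, ← List.cons_append, ih]

-- the stack loop distributes over the stack
theorem pvStackLoop_append_aux : ∀ (n : Nat) (ts us : List (PVForest × List (String × String))),
    (ts.map (fun t => t.1.size + 1)).sum ≤ n →
    pvStackLoop (ts ++ us) = pvStackLoop ts ++ pvStackLoop us := by
  intro n
  induction n with
  | zero =>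
    intro ts us h
    cases ts with
    | nil => simp [pvStackLoop]
    | cons t ts => simp at h
  | succ n ih =>
    intro ts us h
    cases ts with
    | nil => simp [pvStackLoop]
    | cons t ts =>
      obtain ⟨f, p⟩ := t
      rw [List.cons_append, pvStackLoop, pvStackLoop, pvPushFoldAppend, List.append_assoc]
      congr 1
      apply ih
      have h1 := pvPushSum (PySem.List.sorted f.items (fun e => PySem.Str.lower e.1) true) ts
      rw [pvSortedSizeSum, pvItemsSizeSum] at h1
      rw [h1]
      simp only [List.map_cons, List.sum_cons] at h
      omega

theorem pvStackLoop_append (ts us : List (PVForest × List (String × String))) :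
    pvStackLoop (ts ++ us) = pvStackLoop ts ++ pvStackLoop us :=
  pvStackLoop_append_aux ((ts.map (fun t => t.1.size + 1)).sum) ts us le_rfl

theorem pvStackLoop_flatMap : ∀ (ts : List (PVForest × List (String × String))),
    pvStackLoop ts = ts.flatMap (fun t => pvStackLoop [t]) := by
  intro ts
  induction ts with
  | nil => simp [pvStackLoop]
  | cons t ts ih =>
    have h : t :: ts = [t] ++ ts := rfl
    rw [h, pvStackLoop_append, ih]
    simp

-- sorting a mapped list = mapping the sorted list (key composes)
theorem pvSorted_map {α β κ : Type} [LT κ] [DecidableLT κ] (l : List α) (f : α → β)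
    (key : β → κ) (rev : Bool) :
    PySem.List.sorted (l.map f) key rev = (PySem.List.sorted l (fun x => key (f x)) rev).map f := by
  have hins : ∀ (b : β → β → Bool) (b' : α → α → Bool), (∀ x y, b (f x) (f y) = b' x y) →
      ∀ (x : α) (m : List α),
      PySem.List.insertBy b (f x) (m.map f) = (PySem.List.insertBy b' x m).map f := by
    intro b b' hb x m
    induction m with
    | nil => simp [PySem.List.insertBy]
    | cons y m ih =>
      rw [List.map_cons, PySem.List.insertBy, PySem.List.insertBy, hb]
      split <;> simp [ih]
  have hfold : ∀ (b : β → β → Bool) (b' : α → α → Bool), (∀ x y, b (f x) (f y) = b' x y) →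
      ∀ (m : List α) (acc : List α),
      (m.map f).foldl (fun a x => PySem.List.insertBy b x a) (acc.map f)
        = (m.foldl (fun a x => PySem.List.insertBy b' x a) acc).map f := by
    intro b b' hb m
    induction m with
    | nil => intro acc; rfl
    | cons y m ih =>
      intro acc
      rw [List.map_cons, List.foldl_cons, List.foldl_cons, hins b b' hb, ih]
  cases rev with
  | false =>
    rw [PySem.List.sorted_eq_foldl_insertBy, PySem.List.sorted_eq_foldl_insertBy]
    simpa using hfold (fun a c => decide (key a < key c))
      (fun a c => decide (key (f a) < key (f c))) (fun _ _ => rfl) l []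
  | true =>
    rw [PySem.List.sorted_rev_eq_foldl_insertBy, PySem.List.sorted_rev_eq_foldl_insertBy]
    simpa using hfold (fun a c => decide (key c < key a))
      (fun a c => decide (key (f c) < key (f a))) (fun _ _ => rfl) l []

theorem pvPushFoldRev (l : List (String × PVForest × List (String × String))) :
    ∀ (st : List (PVForest × List (String × String))),
    l.foldl (fun st e => e.2 :: st) st = (l.map (fun e => e.2)).reverse ++ st := by
  induction l with
  | nil => intro st; simp
  | cons e l ih => intro st; rw [List.foldl_cons, ih]; simp

theorem pvGood_sub (c : String) (es : List (List String × String × String))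
    (hg : pvGood es) : pvGood (pvSub c es) := by
  intro x hx
  simp only [pvSub, List.mem_map, List.mem_filter] at hx
  obtain ⟨p, ⟨hp, _⟩, hpx⟩ := hx
  simp only [pvChildren, List.mem_filterMap] at hp
  obtain ⟨a, ha, hmatch⟩ := hp
  rcases a with ⟨path, akv⟩
  cases path with
  | nil => simp at hmatch
  | cons a0 arest =>
    simp only [Option.some.injEq] at hmatch
    intro cc hcc
    refine hg (a0 :: arest, akv) ha cc ?_
    subst hmatch
    subst hpx
    simp only at hcc
    exact List.mem_cons_of_mem _ hcc

-- main lemma: on good entries the stack DFS over the built tree is B's recursion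
theorem pvMain : ∀ (n : Nat) (es : List (List String × String × String)),
    pvMeasure es ≤ n → pvGood es → pvStackLoop [pvBuildE es] = pvRecB es := by
  intro n
  induction n with
  | zero =>
    intro es h _
    have hes : es = [] := by
      cases es with
      | nil => rfl
      | cons e es => exfalso; simp [pvMeasure] at h
    subst hes
    rw [pvRecB_eq]
    have h1 : pvBuildE [] = (.nil, []) := rfl
    rw [h1, pvStackLoop]
    have h2 : PySem.List.sorted ((PVForest.nil).items) (fun e => PySem.Str.lower e.1) true = [] := by
      decide
    have h3 : PySem.List.sorted ([] : List (String × String)) (fun kv => PySem.Str.lower kv.1) false = [] := by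
      decide
    have h4 : (PySem.List.sorted (PySem.Set.ofList ((pvChildren ([] : List (List String × String × String))).map (fun p => p.1)))
        PySem.Str.lower true) = [] := by decide
    rw [h2, h3, h4]
    simp [pvStackLoop]
    exact h3
  | succ n ih =>
    intro es hm hg
    have hP := pvBuildE_params es
    have hF := pvBuildE_items es hg
    rcases hFP : pvBuildE es with ⟨F, P⟩
    rw [hFP] at hP hF
    simp only at hP hF
    rw [pvStackLoop, hP, hF]
    rw [pvSorted_map (PySem.Set.ofList ((pvChildren es).map (fun p => p.1)))
      (fun c => (c, pvBuildE (pvSub c es))) (fun e => PySem.Str.lower e.1) true]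
    rw [pvPushFoldRev, List.append_nil, List.map_map, ← List.map_reverse]
    rw [pvStackLoop_flatMap, List.flatMap_map]
    rw [pvRecB_eq]
    congr 1
    refine List.flatMap_congr ?_
    intro c hc
    rw [List.mem_reverse, PySem.List.mem_sorted, PySem.Set.mem_ofList] at hc
    have hlt := pvMeasure_sub_lt c es hc
    exact ih (pvSub c es) (by omega) (pvGood_sub c es hg)


-- ===== length counting (for the tight claim: A drops items inside D_, B keeps them) =====

-- params stored anywhere in a forest
def PVForest.pcount : PVForest → Nat
  | .nil => 0
  | .cons _ cf cp r => cp.length + cf.pcount + r.pcount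

-- params stored in a tree (forest + root params)
def pvTC (t : PVForest × List (String × String)) : Nat := t.1.pcount + t.2.length

-- a path none of whose components is "modules"/"params"
def pvGoodB (path : List String) : Bool := path.all (fun c => !(c == "modules" || c == "params"))

theorem pvPCount_items (F : PVForest) : (F.items.map (fun e => pvTC e.2)).sum = F.pcount := by
  induction F with
  | nil => rfl
  | cons n cf cp r ih1 ih2 =>
    simp only [PVForest.items, List.map_cons, List.sum_cons, PVForest.pcount, pvTC] at *
    omega

theorem pvPushSumG (l : List (String × PVForest × List (String × String))) :
    ∀ (st : List (PVForest × List (String × String))),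
    ((l.foldl (fun st e => e.2 :: st) st).map pvTC).sum
      = (l.map (fun e => pvTC e.2)).sum + (st.map pvTC).sum := by
  induction l with
  | nil => intro st; simp
  | cons e l ih =>
    intro st
    rw [List.foldl_cons, ih]
    simp only [List.map_cons, List.sum_cons]
    omega

theorem pvSortedSumG (l : List (String × PVForest × List (String × String))) :
    ((PySem.List.sorted l (fun e => PySem.Str.lower e.1) true).map (fun e => pvTC e.2)).sum
      = (l.map (fun e => pvTC e.2)).sum :=
  ((PySem.List.sorted_perm l (fun e => PySem.Str.lower e.1) true).map _).sum_eq

theorem pvStackLoop_length_aux : ∀ (n : Nat) (ts : List (PVForest × List (String × String))),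
    (ts.map (fun t => t.1.size + 1)).sum ≤ n →
    (pvStackLoop ts).length = (ts.map pvTC).sum := by
  intro n
  induction n with
  | zero =>
    intro ts h
    cases ts with
    | nil => simp [pvStackLoop]
    | cons t ts => simp at h
  | succ n ih =>
    intro ts h
    cases ts with
    | nil => simp [pvStackLoop]
    | cons t ts =>
      obtain ⟨f, p⟩ := t
      rw [pvStackLoop, List.length_append, PySem.List.length_sorted]
      have hfuel : (((PySem.List.sorted f.items (fun e => PySem.Str.lower e.1) true).foldl
          (fun st e => e.2 :: st) ts).map (fun t => t.1.size + 1)).sum ≤ n := by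
        have h1 := pvPushSum (PySem.List.sorted f.items (fun e => PySem.Str.lower e.1) true) ts
        rw [pvSortedSizeSum, pvItemsSizeSum] at h1
        rw [h1]
        simp only [List.map_cons, List.sum_cons] at h
        omega
      rw [ih _ hfuel, pvPushSumG, pvSortedSumG, pvPCount_items]
      simp only [List.map_cons, List.sum_cons, pvTC]
      omega

theorem pvStackLoop_length (ts : List (PVForest × List (String × String))) :
    (pvStackLoop ts).length = (ts.map pvTC).sum :=
  pvStackLoop_length_aux ((ts.map (fun t => t.1.size + 1)).sum) ts le_rfl

theorem pvSet_count : ∀ (F : PVForest) (c : String) (t' : PVForest × List (String × String)),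
    (F.set c t').pcount + pvTC ((F.get? c).getD (.nil, [])) = F.pcount + pvTC t' := by
  intro F
  induction F with
  | nil =>
    intro c t'
    simp [PVForest.set, PVForest.get?, PVForest.pcount, pvTC]
    omega
  | cons n cf cp r ih1 ih2 =>
    intro c t'
    by_cases h : n = c
    · simp only [PVForest.set, PVForest.get?, if_pos h, PVForest.pcount, pvTC,
        Option.getD_some]
      omega
    · have := ih2 c t'
      simp only [PVForest.set, PVForest.get?, if_neg h, PVForest.pcount, pvTC] at *
      omega

theorem pvInsertWalk_count : ∀ (path : List String) (t : PVForest × List (String × String))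
    (kv : String × String),
    pvTC (pvInsertWalk t path kv) = pvTC t + (if pvGoodB path then 1 else 0) := by
  intro path
  induction path with
  | nil =>
    intro t kv
    obtain ⟨f, p⟩ := t
    simp [pvInsertWalk, pvTC, pvGoodB]
    omega
  | cons c rest ih =>
    intro t kv
    obtain ⟨f, p⟩ := t
    by_cases hg : c ≠ "modules" ∧ c ≠ "params"
    · have hb : (!(c == "modules" || c == "params")) = true := by
        simp [hg.1, hg.2]
      have hgood : pvGoodB (c :: rest) = pvGoodB rest := by
        simp only [pvGoodB, List.all_cons, hb, Bool.true_and]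
      simp only [pvInsertWalk, if_pos hg]
      have hset := pvSet_count f c (pvInsertWalk ((f.get? c).getD (.nil, [])) rest kv)
      have hrec := ih ((f.get? c).getD (.nil, [])) kv
      simp only [pvTC] at *
      rw [hgood]
      omega
    · have hbad : pvGoodB (c :: rest) = false := by
        simp only [not_and_or, not_not] at hg
        rcases hg with hg | hg <;> simp [pvGoodB, hg]
      simp [pvInsertWalk, if_neg hg, hbad]
  
theorem pvBuild_count : ∀ (es : List (List String × String × String))
    (t : PVForest × List (String × String)),
    pvTC (es.foldl (fun t e => pvInsertWalk t e.1 e.2) t)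
      = pvTC t + es.countP (fun e => pvGoodB e.1) := by
  intro es
  induction es with
  | nil => intro t; simp
  | cons e es ih =>
    intro t
    rw [List.foldl_cons, ih, pvInsertWalk_count, List.countP_cons]
    split <;> omega

theorem pvSumIndicator0 : ∀ (keys : List String) (x : String), x ∉ keys →
    ((keys.map (fun c => if x == c then 1 else 0)).sum : Nat) = 0 := by
  intro keys x
  induction keys with
  | nil => intro _; rfl
  | cons k ks ih =>
    intro h
    simp only [List.mem_cons, not_or] at h
    have hb : (x == k) = false := beq_eq_false_iff_ne.mpr h.1
    simp only [List.map_cons, List.sum_cons, hb]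
    simpa using ih h.2

theorem pvSumIndicator : ∀ (keys : List String) (x : String), keys.Nodup → x ∈ keys →
    ((keys.map (fun c => if x == c then 1 else 0)).sum : Nat) = 1 := by
  intro keys x
  induction keys with
  | nil => intro _ h; simp at h
  | cons k ks ih =>
    intro hnd hx
    simp only [List.nodup_cons] at hnd
    by_cases hk : x = k
    · subst hk
      simp only [List.map_cons, List.sum_cons, beq_self_eq_true, if_true]
      rw [pvSumIndicator0 ks x hnd.1]
    · have hb : (x == k) = false := beq_eq_false_iff_ne.mpr hk
      simp only [List.mem_cons] at hx
      rcases hx with hx | hx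
      · exact absurd hx hk
      · simp only [List.map_cons, List.sum_cons, hb]
        simpa using ih hnd.2 hx

theorem pvSumAdd (keys : List String) (a b : String → Nat) :
    (keys.map (fun c => a c + b c)).sum = (keys.map a).sum + (keys.map b).sum := by
  induction keys with
  | nil => rfl
  | cons k ks ih => simp only [List.map_cons, List.sum_cons, ih]; omega

theorem pvPartition : ∀ (l : List (String × List String × String × String)) (keys : List String),
    keys.Nodup → (∀ p ∈ l, p.1 ∈ keys) →
    (keys.map (fun c => (l.filter (fun p => p.1 == c)).length)).sum = l.length := by
  intro l
  induction l with
  | nil => intro keys _ _; simp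
  | cons p l ih =>
    intro keys hnd hmem
    have hlen : ∀ c, ((p :: l).filter (fun q => q.1 == c)).length
        = (if p.1 == c then 1 else 0) + (l.filter (fun q => q.1 == c)).length := by
      intro c
      rw [List.filter_cons]
      split
      · simp; omega
      · simp
    rw [List.map_congr_left (fun c _ => hlen c), pvSumAdd,
      pvSumIndicator keys p.1 hnd (hmem p List.mem_cons_self),
      ih keys hnd (fun q hq => hmem q (List.mem_cons_of_mem _ hq))]
    simp only [List.length_cons]
    omega

theorem pvSplitCount : ∀ (es : List (List String × String × String)),
    (es.filter (fun e => e.1.isEmpty)).length + (pvChildren es).length = es.length := by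
  intro es
  induction es with
  | nil => rfl
  | cons e es ih =>
    obtain ⟨path, kv⟩ := e
    cases path with
    | nil =>
      simp only [pvChildren, List.filterMap_cons, List.filter_cons] at *
      simp at *
      omega
    | cons c rest =>
      simp only [pvChildren, List.filterMap_cons, List.filter_cons] at *
      simp at *
      omega

theorem pvSortedKeysSumG (keys : List String) (g : String → Nat) :
    ((PySem.List.sorted keys PySem.Str.lower true).map g).sum = (keys.map g).sum :=
  ((PySem.List.sorted_perm keys PySem.Str.lower true).map _).sum_eq

theorem pvRecB_length_aux : ∀ (n : Nat) (es : List (List String × String × String)),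
    pvMeasure es ≤ n → (pvRecB es).length = es.length := by
  intro n
  induction n with
  | zero =>
    intro es h
    have hes : es = [] := by
      cases es with
      | nil => rfl
      | cons e es => exfalso; simp [pvMeasure] at h
    subst hes
    rw [pvRecB_eq]
    have hs : PySem.List.sorted (PySem.Set.ofList
        ((pvChildren ([] : List (List String × String × String))).map (fun p => p.1)))
        PySem.Str.lower true = [] := by decide
    have hs2 : PySem.List.sorted ([] : List String) PySem.Str.lower true = [] := by decide
    simp [hs2, pvChildren, PySem.List.length_sorted]
  | succ n ih =>
    intro es h
    rw [pvRecB_eq, List.length_append, PySem.List.length_sorted, List.length_map,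
      List.length_flatMap]
    have hcong : ((PySem.List.sorted (PySem.Set.ofList ((pvChildren es).map (fun p => p.1)))
          PySem.Str.lower true).reverse.map (fun c => (pvRecB (pvSub c es)).length))
        = ((PySem.List.sorted (PySem.Set.ofList ((pvChildren es).map (fun p => p.1)))
          PySem.Str.lower true).reverse.map
            (fun c => ((pvChildren es).filter (fun p => p.1 == c)).length)) := by
      refine List.map_congr_left ?_
      intro c hc
      rw [List.mem_reverse, PySem.List.mem_sorted, PySem.Set.mem_ofList] at hc
      have hlt := pvMeasure_sub_lt c es hc
      rw [ih (pvSub c es) (by omega)]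
      simp [pvSub]
    rw [hcong, List.map_reverse, List.sum_reverse, pvSortedKeysSumG]
    rw [pvPartition (pvChildren es) _ (PySem.Set.nodup_ofList _) ?_]
    · exact pvSplitCount es
    · intro p hp
      rw [PySem.Set.mem_ofList]
      exact List.mem_map.mpr ⟨p, hp, rfl⟩

theorem pvRecB_length (es : List (List String × String × String)) :
    (pvRecB es).length = es.length :=
  pvRecB_length_aux (pvMeasure es) es le_rfl

theorem pvMain' (es : List (List String × String × String)) (hg : pvGood es) :
    pvStackLoop [pvBuildE es] = pvRecB es :=
  pvMain (pvMeasure es) es le_rfl hg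

-- ===== VERDICT (by name: the statement is the Claim_ definition above) =====
theorem sorted_by_state_key_modules_spec : Claim_unchanged_sorted_by_state_key_modules := by
  intro items _ hnd
  have hgood : pvGood (pvEntries items) := by
    intro e he c hcc hbad
    apply hnd
    simp only [pvEntries, List.mem_map] at he
    obtain ⟨kv, hkv, hekv⟩ := he
    exact ⟨kv, hkv, c, by rw [← hekv] at hcc; exact hcc, hbad⟩
  unfold sorted_by_state_key_modules sorted_by_state_key_modules_alt
  rw [pvStackLoopF_run (pvBuildA items), pvRecBF_run (pvEntries items)]
  have hbuild : pvBuildE (pvEntries items) = pvBuildA items := by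
    unfold pvBuildE pvEntries pvBuildA
    rw [List.foldl_map]
  rw [← hbuild]
  exact pvMain' _ hgood

theorem sorted_by_state_key_modules_changed : Claim_changed_sorted_by_state_key_modules := by
  unfold Claim_changed_sorted_by_state_key_modules
  decide

theorem sorted_by_state_key_modules_tight : Claim_exact_sorted_by_state_key_modules := by
  intro items _ hD heq
  unfold sorted_by_state_key_modules sorted_by_state_key_modules_alt at heq
  rw [pvStackLoopF_run (pvBuildA items), pvRecBF_run (pvEntries items)] at heq
  have hbuild : pvBuildE (pvEntries items) = pvBuildA items := by
    unfold pvBuildE pvEntries pvBuildA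
    rw [List.foldl_map]
  have hlenA : (pvStackLoop [pvBuildA items]).length
      = (pvEntries items).countP (fun e => pvGoodB e.1) := by
    rw [pvStackLoop_length, ← hbuild]
    unfold pvBuildE
    simp only [List.map_cons, List.map_nil, List.sum_cons, List.sum_nil]
    rw [pvBuild_count]
    simp [pvTC, PVForest.pcount]
  have hlenB : (pvRecB (pvEntries items)).length = items.length := by
    rw [pvRecB_length]
    simp [pvEntries]
  have hlens : (pvEntries items).countP (fun e => pvGoodB e.1) = items.length := by
    rw [← hlenA, ← hlenB, heq]
  obtain ⟨kv, hkv, c, hc, hbad⟩ := hD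
  have hall := List.countP_eq_length.mp (by
    rw [hlens]; simp [pvEntries] : (pvEntries items).countP (fun e => pvGoodB e.1)
      = (pvEntries items).length)
  have hmem : ((pvPathOf kv.1, kv) : List String × String × String) ∈ pvEntries items := by
    simp only [pvEntries, List.mem_map]
    exact ⟨kv, hkv, rfl⟩
  have hgood := hall _ hmem
  simp only [pvGoodB, List.all_eq_true] at hgood
  have := hgood c (by simpa [pvPathOf] using hc)
  rcases hbad with hbad | hbad <;> simp [hbad] at this
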